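-- pv_equiv track=rewrite | github.com/AleksNeStu/projects | code/complexity/time/001_ex_matplotlib/main.py | set_w_nested_loop
-- ===== SOURCE A (Python) =====
-- def set_w_nested_loop(input):
--     import itertools
--
--     sums = set()
--     for idx in range(0, len(input) + 1):
--         sums.update([sum(comb) for comb in itertools.combinations(input, idx)])
--
--     for every in range(0, max(sums) + 2):
--         if every not in input and every not in sums:
--             return every
-- ===== SOURCE B (Python) =====
-- def set_w_nested_loop(input):
--     # Incremental subset-sum DP: extend the reachable-sum set one element at a
--     # time instead of enumerating all 2^n combinations, then scan up from 0.
--     sums = {0}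
--     for x in input:
--         sums |= {s + x for s in sums}
--     k = 0
--     while k in sums:
--         k += 1
--     return k
-- ===== Notes on version B (the rewrite author's own statement) =====
-- stated objective: faster
-- what changed: A enumerates all 2^n itertools.combinations and recomputes each subset sum from scratch; B builds the reachable-sum set incrementally (set DP, one extension per element, duplicates merged) and scans up from 0 with a while loop, no max() needed.
import Mathlib
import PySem

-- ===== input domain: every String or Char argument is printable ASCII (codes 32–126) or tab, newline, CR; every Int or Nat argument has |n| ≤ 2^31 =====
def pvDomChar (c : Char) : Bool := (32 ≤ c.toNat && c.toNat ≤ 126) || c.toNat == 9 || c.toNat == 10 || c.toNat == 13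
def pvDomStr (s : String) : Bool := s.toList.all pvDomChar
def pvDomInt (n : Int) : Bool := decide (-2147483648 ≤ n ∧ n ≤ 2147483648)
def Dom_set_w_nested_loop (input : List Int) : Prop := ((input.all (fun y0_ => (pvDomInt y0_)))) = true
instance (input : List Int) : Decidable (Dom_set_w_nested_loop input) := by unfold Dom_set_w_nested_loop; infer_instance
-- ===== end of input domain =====

-- B replaces A's exponential enumeration of all combinations by an incremental
-- reachable-sum set (subset-sum DP) and scans up from 0 with a while loop.

-- ===== PORT A =====
-- itertools.combinations(xs, k), transliterated
def pvCombs : Nat → List Int → List (List Int)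
  | 0, _ => [[]]
  | _+1, [] => []
  | k+1, x :: xs => ((pvCombs k xs).map (fun c => x :: c)) ++ pvCombs (k+1) xs

-- A's first loop: sums.update([sum(comb) for comb in combinations(input, idx)])
def pvSumsA (input : List Int) : PySem.Set Int :=
  (PySem.List.pyRange 0 ((input.length : Int) + 1) 1).foldl
    (fun s idx => PySem.Set.update s ((pvCombs idx.toNat input).map (fun c => c.sum)))
    PySem.Set.empty

-- A's second loop 'for every in range(0, max(sums)+2): if …: return every', ported
-- by hand as a bounded counter recursion because Python's range is LAZY here (the
-- bound can be astronomically large and the loop returns early); exact on every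
-- input on which the loop returns (it always does: max(sums)+1 qualifies, so the
-- fall-through 0 --- Python's None --- is unreachable, as the proof shows)
def pvScanA (input : List Int) (sums : PySem.Set Int) (every stop : Int) : Int :=
  if every < stop then
    (if !(input.contains every) && !(PySem.Set.contains sums every) then every
     else pvScanA input sums (every + 1) stop)
  else 0
termination_by (stop - every).toNat
decreasing_by omega

def set_w_nested_loop (input : List Int) : Int :=
  let sums : PySem.Set Int := pvSumsA input
  let m : Int := ((PySem.List.max? sums (fun y => y)).getD 0)
  pvScanA input sums 0 (m + 2)

-- ===== PORT B =====
-- Source B's loop: sums |= {s + x for s in sums}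
def pvSumsB (input : List Int) : PySem.Set Int :=
  input.foldl
    (fun s x => PySem.Set.union s (PySem.Set.ofList (s.map (fun t => t + x))))
    (PySem.Set.ofList [(0 : Int)])

-- Source B's 'while k in sums: k += 1'
def pvLoopK (s : List Int) (k : Int) : Int :=
  if h : k ∈ s then pvLoopK s (k + 1) else k
termination_by (((PySem.List.max? s (fun y => y)).getD 0) + 1 - k).toNat
decreasing_by
  obtain ⟨m, hm⟩ : ∃ m, PySem.List.max? s (fun y => y) = some m := by
    cases hmax : PySem.List.max? s (fun y => y) with
    | none =>
      rw [PySem.List.max?_eq_none_iff] at hmax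
      subst hmax; simp at h
    | some m => exact ⟨m, rfl⟩
  have hk := PySem.List.max?_isMax hm k h
  simp only [hm, Option.getD_some]
  simp only at hk
  omega

def set_w_nested_loop_alt (input : List Int) : Int :=
  pvLoopK (pvSumsB input) 0

-- ===== PRECONDITION & SPEC =====
def Spec_set_w_nested_loop (input : List Int) (out : Int) : Prop := out = set_w_nested_loop_alt input
instance (input : List Int) (out : Int) : Decidable (Spec_set_w_nested_loop input out) := by unfold Spec_set_w_nested_loop; infer_instance

-- ===== CLAIM (what is proved, stated in full; the proofs are below) =====
def Claim_equal_set_w_nested_loop : Prop := ∀ (input : List Int), Dom_set_w_nested_loop input → Spec_set_w_nested_loop input (set_w_nested_loop input)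

-- ===== LEMMAS AND PROOFS =====

-- membership in pvCombs = sublists of the given length
theorem pvCombs_mem : ∀ (xs : List Int) (k : Nat) (c : List Int),
    c ∈ pvCombs k xs ↔ c.Sublist xs ∧ c.length = k := by
  intro xs
  induction xs with
  | nil =>
    intro k c
    cases k with
    | zero => simp [pvCombs, List.sublist_nil, List.length_eq_zero_iff]
    | succ k =>
      simp [pvCombs, List.sublist_nil]
      rintro rfl
      simp
  | cons x xs ih =>
    intro k c
    cases k with
    | zero =>
      simp [pvCombs, List.length_eq_zero_iff]
      rintro rfl
      exact List.nil_sublist _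
    | succ k =>
      simp only [pvCombs, List.mem_append, List.mem_map, ih]
      constructor
      · rintro (⟨a, ⟨hsub, hlen⟩, rfl⟩ | ⟨hsub, hlen⟩)
        · exact ⟨List.cons_sublist_cons.mpr hsub, by simp [hlen]⟩
        · exact ⟨hsub.cons x, hlen⟩
      · rintro ⟨hsub, hlen⟩
        rcases List.sublist_cons_iff.mp hsub with h | ⟨r, rfl, hr⟩
        · exact Or.inr ⟨h, hlen⟩
        · exact Or.inl ⟨r, ⟨hr, by simpa using hlen⟩, rfl⟩

theorem mem_foldl_update {β : Type} (f : β → List Int) :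
    ∀ (l : List β) (s0 : List Int) (y : Int),
      y ∈ l.foldl (fun s b => PySem.Set.update s (f b)) s0 ↔ y ∈ s0 ∨ ∃ b ∈ l, y ∈ f b := by
  intro l
  induction l with
  | nil => simp
  | cons b l ih =>
    intro s0 y
    simp only [List.foldl_cons, ih, PySem.Set.mem_update, List.mem_cons]
    constructor
    · rintro ((h | h) | ⟨b', hb', hy⟩)
      · exact Or.inl h
      · exact Or.inr ⟨b, Or.inl rfl, h⟩
      · exact Or.inr ⟨b', Or.inr hb', hy⟩
    · rintro (h | ⟨b', (rfl | hb'), hy⟩)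
      · exact Or.inl (Or.inl h)
      · exact Or.inl (Or.inr hy)
      · exact Or.inr ⟨b', hb', hy⟩

-- membership in A's sums set
theorem memA (input : List Int) (t : Int) :
    t ∈ pvSumsA input ↔ ∃ c : List Int, c.Sublist input ∧ c.sum = t := by
  unfold pvSumsA
  rw [mem_foldl_update]
  simp only [PySem.Set.empty, List.not_mem_nil, false_or, List.mem_map,
    PySem.List.mem_pyRange_one, pvCombs_mem]
  constructor
  · rintro ⟨idx, _, c, ⟨hsub, _⟩, rfl⟩
    exact ⟨c, hsub, rfl⟩
  · rintro ⟨c, hsub, rfl⟩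
    refine ⟨(c.length : Int), ⟨by positivity, ?_⟩, c, ⟨hsub, by simp⟩, rfl⟩
    have := hsub.length_le
    omega

theorem memB_aux :
    ∀ (xs : List Int) (s0 : List Int) (t : Int),
      t ∈ xs.foldl
        (fun s x => PySem.Set.union s (PySem.Set.ofList (s.map (fun u => u + x)))) s0
      ↔ ∃ u ∈ s0, ∃ c : List Int, c.Sublist xs ∧ t = u + c.sum := by
  intro xs
  induction xs with
  | nil =>
    intro s0 t
    simp [List.sublist_nil]
  | cons x xs ih =>
    intro s0 t
    simp only [List.foldl_cons, ih]
    constructor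
    · rintro ⟨u, hu, c, hsub, rfl⟩
      rw [PySem.Set.mem_union] at hu
      rcases hu with hu | hu
      · exact ⟨u, hu, c, hsub.cons x, rfl⟩
      · rw [PySem.Set.mem_ofList, List.mem_map] at hu
        obtain ⟨v, hv, rfl⟩ := hu
        exact ⟨v, hv, x :: c, List.cons_sublist_cons.mpr hsub, by simp; ring⟩
    · rintro ⟨u, hu, c, hsub, rfl⟩
      rcases List.sublist_cons_iff.mp hsub with h | ⟨r, rfl, hr⟩
      · exact ⟨u, by rw [PySem.Set.mem_union]; exact Or.inl hu, c, h, rfl⟩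
      · refine ⟨u + x, ?_, r, hr, by simp; ring⟩
        rw [PySem.Set.mem_union, PySem.Set.mem_ofList]
        exact Or.inr (List.mem_map.mpr ⟨u, hu, rfl⟩)

-- membership in B's sums set
theorem memB (input : List Int) (t : Int) :
    t ∈ pvSumsB input ↔ ∃ c : List Int, c.Sublist input ∧ c.sum = t := by
  unfold pvSumsB
  rw [memB_aux]
  constructor
  · rintro ⟨u, hu, c, hsub, rfl⟩
    simp only [PySem.Set.mem_ofList, List.mem_singleton] at hu
    subst hu
    exact ⟨c, hsub, by omega⟩
  · rintro ⟨c, hsub, rfl⟩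
    exact ⟨0, by simp [PySem.Set.mem_ofList], c, hsub, by omega⟩

theorem pvLoopK_not_mem (s : List Int) (k : Int) : pvLoopK s k ∉ s := by
  induction k using pvLoopK.induct s with
  | case1 k h ih => rw [pvLoopK]; simp [h, ih]
  | case2 k h => rw [pvLoopK]; simp [h]

theorem pvLoopK_ge (s : List Int) (k : Int) : k ≤ pvLoopK s k := by
  induction k using pvLoopK.induct s with
  | case1 k h ih => rw [pvLoopK]; simp only [h, dite_true]; omega
  | case2 k h => rw [pvLoopK]; simp [h]

theorem pvLoopK_mem_below (s : List Int) (k : Int) :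
    ∀ j, k ≤ j → j < pvLoopK s k → j ∈ s := by
  induction k using pvLoopK.induct s with
  | case1 k h ih =>
    intro j h1 h2
    rw [pvLoopK] at h2
    simp only [h, dite_true] at h2
    rcases eq_or_lt_of_le h1 with rfl | hlt
    · exact h
    · exact ih j (by omega) h2
  | case2 k h =>
    intro j h1 h2
    rw [pvLoopK] at h2
    simp only [h, dite_false] at h2
    omega

theorem pvScanA_eq (input : List Int) (sums : PySem.Set Int) (w stop : Int)
    (hw : w < stop)
    (hp : (!(input.contains w) && !(PySem.Set.contains sums w)) = true)
    (hb : ∀ j, 0 ≤ j → j < w →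
      (!(input.contains j) && !(PySem.Set.contains sums j)) = false) :
    ∀ (n : Nat) (a : Int), (w - a).toNat = n → 0 ≤ a → a ≤ w →
    pvScanA input sums a stop = w := by
  intro n
  induction n with
  | zero =>
    intro a hn h0a ha
    have : a = w := by omega
    subst this
    rw [pvScanA, if_pos hw, if_pos hp]
  | succ n ih =>
    intro a hn h0a ha
    have haw : a < w := by omega
    rw [pvScanA, if_pos (by omega), if_neg (by rw [hb a h0a haw]; simp)]
    exact ih (a + 1) (by omega) (by omega) (by omega)

-- ===== VERDICT (by name: the statement is the Claim_ definition above) =====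
theorem set_w_nested_loop_spec : Claim_equal_set_w_nested_loop := by
  intro input _
  unfold Spec_set_w_nested_loop set_w_nested_loop set_w_nested_loop_alt
  simp only []
  -- membership transfer
  have hAB : ∀ t : Int, t ∈ pvSumsA input ↔ t ∈ pvSumsB input := by
    intro t; rw [memA, memB]
  have h0 : (0 : Int) ∈ pvSumsA input := (memA input 0).mpr ⟨[], List.nil_sublist _, rfl⟩
  have hin : ∀ x ∈ input, x ∈ pvSumsA input := fun x hx =>
    (memA input x).mpr ⟨[x], List.singleton_sublist.mpr hx, by simp⟩
  obtain ⟨m, hm⟩ : ∃ m, PySem.List.max? (pvSumsA input) (fun y => y) = some m := by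
    cases hmax : PySem.List.max? (pvSumsA input) (fun y => y) with
    | none =>
      rw [PySem.List.max?_eq_none_iff] at hmax
      rw [hmax] at h0; simp at h0
    | some m => exact ⟨m, rfl⟩
  have hmax : ∀ y ∈ pvSumsA input, y ≤ m := by
    intro y hy
    simpa using PySem.List.max?_isMax hm y hy
  set r := pvLoopK (pvSumsB input) 0 with hr
  have hr1 : r ∉ pvSumsB input := pvLoopK_not_mem _ _
  have hr2 : (0 : Int) ≤ r := pvLoopK_ge _ _
  have hr3 : ∀ j, 0 ≤ j → j < r → j ∈ pvSumsB input := pvLoopK_mem_below _ _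
  have h0m : (0 : Int) ≤ m := hmax 0 h0
  have hrm : r < m + 2 := by
    by_contra hcon
    push Not at hcon
    have : m + 1 ∈ pvSumsB input := hr3 (m + 1) (by omega) (by omega)
    have := hmax (m + 1) ((hAB (m + 1)).mpr this)
    omega
  rw [hm]
  simp only [Option.getD_some]
  rw [pvScanA_eq input (pvSumsA input) r (m + 2) hrm ?_ ?_ r.toNat 0 (by omega) (by omega) (by omega)]
  · -- p r = true
    have hrA : r ∉ pvSumsA input := fun h => hr1 ((hAB r).mp h)
    have hrI : r ∉ input := fun h => hrA (hin r h)
    simp [hrA, hrI]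
  · -- p j = false below r
    intro j h1 h2
    have hjB : j ∈ pvSumsB input := hr3 j h1 h2
    have hjA : j ∈ pvSumsA input := (hAB j).mpr hjB
    simp [hjA]
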